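-- pv_equiv track=rewrite | github.com/ldgonzalezvazquez/TD | SRARec/generate_graphs.py | _asignar_pistas_por_gen
-- ===== SOURCE A (Python) =====
-- def _asignar_pistas_por_gen(genes_with_regions):
--     """
--     Asigna pistas (tracks) a genes considerando cada gen como una unidad.
--     Todas las regiones de un mismo gen comparten el mismo track.
--
--     Input: lista de tuplas (min_start, max_end, name, regions)
--            donde regions es una lista de tuplas (start, end)
--     Output: lista de tuplas (name, track, regions)
--     """
--     pistas_fin = []  # último "max_end" de cada pista
--     genes_con_pista = []
--
--     for min_start, max_end, name, regions in genes_with_regions: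
--         assigned = False
--         for i, ultimo_end in enumerate(pistas_fin):
--             if min_start > ultimo_end:  # el gen cabe en la pista i
--                 pistas_fin[i] = max_end
--                 genes_con_pista.append((name, i, regions))
--                 assigned = True
--                 break
--
--         if not assigned:  # ninguna pista libre → crea una nueva
--             pistas_fin.append(max_end)
--             genes_con_pista.append((name, len(pistas_fin) - 1, regions))
--
--     return genes_con_pista
-- ===== SOURCE B (Python) =====
-- def _asignar_pistas_por_gen(genes_with_regions):
--     """
--     Same assignment as before, but the leftmost track whose last end is
--     < min_start is found with a min-tournament tree over track ends
--     (None = unused slot, acting as +infinity), one O(log n) descent per gene.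
--     """
--     n = len(genes_with_regions)
--     h = 0
--     while (1 << h) < n:
--         h += 1
--
--     def smin(a, b):
--         if a is None:
--             return b
--         if b is None:
--             return a
--         return a if a <= b else b
--
--     def make(height):
--         if height == 0:
--             return ('leaf', None)
--         child = make(height - 1)
--         return ('node', None, child, child)
--
--     def lt(v, s):
--         return v is not None and v < s
--
--     def update(t, height, pos, v):
--         if t[0] == 'leaf':
--             return ('leaf', v)
--         _, _, l, r = t
--         half = 1 << (height - 1)
--         if pos < half:
--             l = update(l, height - 1, pos, v)
--         else:
--             r = update(r, height - 1, pos - half, v)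
--         return ('node', smin(l[1], r[1]), l, r)
--
--     def query(t, height, s):
--         if t[0] == 'leaf':
--             return 0
--         _, _, l, r = t
--         if lt(l[1], s):
--             return query(l, height - 1, s)
--         return (1 << (height - 1)) + query(r, height - 1, s)
--
--     tree = make(h)
--     cnt = 0
--     genes_con_pista = []
--     for min_start, max_end, name, regions in genes_with_regions:
--         if lt(tree[1], min_start):
--             pos = query(tree, h, min_start)
--             tree = update(tree, h, pos, max_end)
--         else:
--             pos = cnt
--             tree = update(tree, h, cnt, max_end)
--             cnt += 1
--         genes_con_pista.append((name, pos, regions))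
--     return genes_con_pista
-- ===== Notes on version B (the rewrite author's own statement) =====
-- stated objective: faster
-- what changed: A's per-gene linear scan over all track ends is replaced by a min-tournament (segment) tree over track ends: one O(log n) root-to-leaf descent finds the leftmost track whose end precedes the gene's min_start, and a point update records the new end.
import Mathlib
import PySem

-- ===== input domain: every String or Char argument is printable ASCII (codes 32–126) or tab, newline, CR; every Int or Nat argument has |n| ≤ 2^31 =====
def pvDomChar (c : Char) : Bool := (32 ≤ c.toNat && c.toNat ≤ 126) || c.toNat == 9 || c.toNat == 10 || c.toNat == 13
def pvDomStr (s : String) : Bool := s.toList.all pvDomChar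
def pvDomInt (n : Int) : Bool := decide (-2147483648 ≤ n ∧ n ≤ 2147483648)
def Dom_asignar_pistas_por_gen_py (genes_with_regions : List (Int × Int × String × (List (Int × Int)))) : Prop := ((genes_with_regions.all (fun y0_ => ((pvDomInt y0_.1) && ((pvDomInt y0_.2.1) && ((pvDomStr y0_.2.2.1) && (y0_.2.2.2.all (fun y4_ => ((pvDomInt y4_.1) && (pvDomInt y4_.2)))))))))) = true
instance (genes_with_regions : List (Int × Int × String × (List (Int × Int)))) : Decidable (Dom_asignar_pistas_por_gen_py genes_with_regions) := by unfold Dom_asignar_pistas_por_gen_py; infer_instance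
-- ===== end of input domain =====

-- B replaces A's inner linear scan over track ends by a min-tournament tree
-- (leftmost track with end < min_start found by one root-to-leaf descent);
-- objective: asymptotically faster greedy track assignment, same output.

-- ===== PORT A =====
-- inner `for i, ultimo_end in enumerate(pistas_fin): if min_start > ultimo_end: … break`:
-- first index whose end is before min_start, together with the updated pistas_fin
def aScan (pistas : List Int) (min_start max_end : Int) (i : Nat) :
    Option (Nat × List Int) :=
  match pistas with
  | [] => none
  | e :: rest =>
    if min_start > e then some (i, max_end :: rest)
    else
      match aScan rest min_start max_end (i + 1) with
      | some (j, l) => some (j, e :: l)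
      | none => none

def aLoop : List (Int × Int × String × (List (Int × Int))) → List Int →
    List (String × Int × (List (Int × Int))) → List (String × Int × (List (Int × Int)))
  | [], _, acc => acc
  | (min_start, max_end, name, regions) :: rest, pistas, acc =>
    match aScan pistas min_start max_end 0 with
    | some (i, pistas') => aLoop rest pistas' (acc ++ [(name, (i : Int), regions)])
    | none => aLoop rest (pistas ++ [max_end]) (acc ++ [(name, (pistas.length : Int), regions)])

def asignar_pistas_por_gen_py (genes_with_regions : List (Int × Int × String × (List (Int × Int)))) : List (String × Int × (List (Int × Int))) :=
  aLoop genes_with_regions [] []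

-- ===== PORT B =====
-- the tuples ('leaf', v) / ('node', m, l, r) of Source B
inductive STree where
  | leaf : Option Int → STree
  | node : Option Int → STree → STree → STree
deriving Repr, DecidableEq

-- t[1] in Source B: the stored minimum
def sval : STree → Option Int
  | .leaf v => v
  | .node m _ _ => m

-- smin in Source B (None = +infinity)
def smin : Option Int → Option Int → Option Int
  | none, b => b
  | some a, none => some a
  | some a, some b => some (min a b)

-- lt in Source B
def sLt : Option Int → Int → Bool
  | none, _ => false
  | some v, s => decide (v < s)

-- make in Source B
def smake : Nat → STree
  | 0 => .leaf none
  | h + 1 => let c := smake h; .node none c c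

-- update in Source B
def supdate : STree → Nat → Nat → Int → STree
  | .leaf _, _, _, v => .leaf (some v)
  | .node _ l r, h, pos, v =>
    let half := 2 ^ (h - 1)
    if pos < half then
      let l' := supdate l (h - 1) pos v
      .node (smin (sval l') (sval r)) l' r
    else
      let r' := supdate r (h - 1) (pos - half) v
      .node (smin (sval l) (sval r')) l r'

-- query in Source B
def squery : STree → Nat → Int → Nat
  | .leaf _, _, _ => 0
  | .node _ l r, h, s =>
    if sLt (sval l) s then squery l (h - 1) s
    else 2 ^ (h - 1) + squery r (h - 1) s

-- `h = 0; while (1 << h) < n: h += 1` in Source B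
def ceilH (n h : Nat) : Nat :=
  if 2 ^ h < n then ceilH n (h + 1) else h
termination_by n - 2 ^ h
decreasing_by
  have : 2 ^ h < 2 ^ (h + 1) := Nat.pow_lt_pow_right (by norm_num) (Nat.lt_succ_self h)
  omega

-- the main `for` loop of Source B
def bLoop : List (Int × Int × String × (List (Int × Int))) → STree → Nat → Nat →
    List (String × Int × (List (Int × Int))) → List (String × Int × (List (Int × Int)))
  | [], _, _, _, acc => acc
  | (min_start, max_end, name, regions) :: rest, t, h, cnt, acc =>
    if sLt (sval t) min_start then
      let pos := squery t h min_start
      bLoop rest (supdate t h pos max_end) h cnt (acc ++ [(name, (pos : Int), regions)])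
    else
      bLoop rest (supdate t h cnt max_end) h (cnt + 1) (acc ++ [(name, (cnt : Int), regions)])

def asignar_pistas_por_gen_py_alt (genes_with_regions : List (Int × Int × String × (List (Int × Int)))) : List (String × Int × (List (Int × Int))) :=
  let h := ceilH genes_with_regions.length 0
  bLoop genes_with_regions (smake h) h 0 []

-- ===== PRECONDITION & SPEC =====
def Spec_asignar_pistas_por_gen_py (genes_with_regions : List (Int × Int × String × (List (Int × Int)))) (out : List (String × Int × (List (Int × Int)))) : Prop := out = asignar_pistas_por_gen_py_alt genes_with_regions
instance (genes_with_regions : List (Int × Int × String × (List (Int × Int)))) (out : List (String × Int × (List (Int × Int)))) : Decidable (Spec_asignar_pistas_por_gen_py genes_with_regions out) := by unfold Spec_asignar_pistas_por_gen_py; infer_instance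

-- ===== CLAIM (what is proved, stated in full; the proofs are below) =====
def Claim_equal_asignar_pistas_por_gen_py : Prop := ∀ (genes_with_regions : List (Int × Int × String × (List (Int × Int)))), Dom_asignar_pistas_por_gen_py genes_with_regions → Spec_asignar_pistas_por_gen_py genes_with_regions (asignar_pistas_por_gen_py genes_with_regions)

-- ===== LEMMAS AND PROOFS =====

-- well-formedness of a tournament tree of height h with correct cached minima
def Wf : Nat → STree → Prop
  | 0, .leaf _ => True
  | h + 1, .node m l r => Wf h l ∧ Wf h r ∧ m = smin (sval l) (sval r)
  | _, _ => False

def leavesOf : STree → List (Option Int)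
  | .leaf v => [v]
  | .node _ l r => leavesOf l ++ leavesOf r

theorem sval_smake (h : Nat) : sval (smake h) = none := by
  cases h <;> simp [smake, sval]

theorem smake_wf (h : Nat) : Wf h (smake h) := by
  induction h with
  | zero => trivial
  | succ h ih => exact ⟨ih, ih, by simp [sval_smake, smin]⟩

theorem leaves_smake (h : Nat) : leavesOf (smake h) = List.replicate (2 ^ h) none := by
  induction h with
  | zero => simp [smake, leavesOf]
  | succ h ih =>
    simp only [smake, leavesOf, ih]
    rw [← List.replicate_add]
    congr 1
    rw [pow_succ]; omega

theorem leaves_length {h : Nat} {t : STree} (hw : Wf h t) : (leavesOf t).length = 2 ^ h := by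
  induction h generalizing t with
  | zero => cases t with
    | leaf v => simp [leavesOf]
    | node m l r => exact absurd hw (by simp [Wf])
  | succ h ih =>
    cases t with
    | leaf v => exact absurd hw (by simp [Wf])
    | node m l r =>
      obtain ⟨hl, hr, _⟩ := hw
      simp [leavesOf, ih hl, ih hr, pow_succ]
      omega

theorem sLt_smin (a b : Option Int) (s : Int) :
    sLt (smin a b) s = (sLt a s || sLt b s) := by
  rcases a with _ | a <;> rcases b with _ | b <;>
    simp [smin, sLt]

theorem sval_any {h : Nat} {t : STree} (hw : Wf h t) (s : Int) :
    sLt (sval t) s = (leavesOf t).any (fun v => sLt v s) := by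
  induction h generalizing t with
  | zero => cases t with
    | leaf v => simp [leavesOf, sval]
    | node m l r => exact absurd hw (by simp [Wf])
  | succ h ih =>
    cases t with
    | leaf v => exact absurd hw (by simp [Wf])
    | node m l r =>
      obtain ⟨hl, hr, hm⟩ := hw
      rw [hm]
      show sLt (smin (sval l) (sval r)) s = _
      rw [sLt_smin, ih hl, ih hr]
      simp [leavesOf]

theorem supdate_spec {h : Nat} {t : STree} (hw : Wf h t) (pos : Nat) (v : Int)
    (hp : pos < 2 ^ h) :
    Wf h (supdate t h pos v) ∧
      leavesOf (supdate t h pos v) = (leavesOf t).set pos (some v) := by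
  induction h generalizing t pos with
  | zero =>
    cases t with
    | leaf w =>
      refine ⟨trivial, ?_⟩
      have hz : pos = 0 := by simpa using hp
      subst hz
      simp [supdate, leavesOf]
    | node m l r => exact absurd hw (by simp [Wf])
  | succ h ih =>
    cases t with
    | leaf w => exact absurd hw (by simp [Wf])
    | node m l r =>
      obtain ⟨hl, hr, hm⟩ := hw
      have h2 : (2 : Nat) ^ (h + 1) = 2 ^ h + 2 ^ h := by rw [pow_succ]; omega
      by_cases hc : pos < 2 ^ h
      · obtain ⟨w1, w2⟩ := ih hl pos hc
        have hred : supdate (STree.node m l r) (h + 1) pos v =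
            STree.node (smin (sval (supdate l h pos v)) (sval r)) (supdate l h pos v) r := by
          simp [supdate, if_pos hc]
        rw [hred]
        refine ⟨⟨w1, hr, rfl⟩, ?_⟩
        simp [leavesOf, w2, leaves_length hl, hc]
      · have hc2 : pos - 2 ^ h < 2 ^ h := by omega
        obtain ⟨w1, w2⟩ := ih hr (pos - 2 ^ h) hc2
        have hred : supdate (STree.node m l r) (h + 1) pos v =
            STree.node (smin (sval l) (sval (supdate r h (pos - 2 ^ h) v))) l
              (supdate r h (pos - 2 ^ h) v) := by
          simp [supdate, if_neg hc]
        rw [hred]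
        refine ⟨⟨hl, w1, rfl⟩, ?_⟩
        simp [leavesOf, w2, List.set_append, leaves_length hl, hc]

theorem squery_findIdx {h : Nat} {t : STree} (hw : Wf h t) (s : Int)
    (hex : (leavesOf t).any (fun v => sLt v s) = true) :
    squery t h s = (leavesOf t).findIdx (fun v => sLt v s) := by
  induction h generalizing t with
  | zero =>
    cases t with
    | leaf v =>
      simp only [leavesOf, List.any_cons, List.any_nil, Bool.or_false] at hex
      simp [squery, leavesOf, List.findIdx_cons, hex]
    | node m l r => exact absurd hw (by simp [Wf])
  | succ h ih =>
    cases t with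
    | leaf v => exact absurd hw (by simp [Wf])
    | node m l r =>
      obtain ⟨hl, hr, hm⟩ := hw
      simp only [leavesOf, List.any_append, Bool.or_eq_true] at hex
      simp only [squery, Nat.add_sub_cancel, leavesOf, List.findIdx_append]
      rw [sval_any hl s]
      by_cases hc : (leavesOf l).any (fun v => sLt v s) = true
      · have hlt : (leavesOf l).findIdx (fun v => sLt v s) < (leavesOf l).length :=
          List.findIdx_lt_length.mpr (by simpa using List.any_eq_true.mp hc)
        rw [if_pos hc, if_pos hlt, ih hl hc]
      · have hcr : (leavesOf r).any (fun v => sLt v s) = true := by tauto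
        have hnlt : ¬ (leavesOf l).findIdx (fun v => sLt v s) < (leavesOf l).length := by
          intro hh
          exact hc (List.any_eq_true.mpr (by simpa using List.findIdx_lt_length.mp hh))
        rw [if_neg (by simp [hc]), if_neg hnlt, ih hr hcr, leaves_length hl,
          Nat.add_comm]

theorem aScan_none (min_start max_end : Int) :
    ∀ (pistas : List Int) (i : Nat),
      pistas.any (fun e => decide (min_start > e)) = false →
      aScan pistas min_start max_end i = none := by
  intro pistas
  induction pistas with
  | nil => intro i _; rfl
  | cons e rest ih =>
    intro i hany
    simp only [List.any_cons, Bool.or_eq_false_iff, decide_eq_false_iff_not] at hany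
    simp [aScan, if_neg hany.1, ih (i + 1) hany.2]

theorem aScan_some (min_start max_end : Int) :
    ∀ (pistas : List Int) (i : Nat),
      pistas.any (fun e => decide (min_start > e)) = true →
      aScan pistas min_start max_end i =
        some (i + pistas.findIdx (fun e => decide (min_start > e)),
          pistas.set (pistas.findIdx (fun e => decide (min_start > e))) max_end) := by
  intro pistas
  induction pistas with
  | nil => intro i h; simp at h
  | cons e rest ih =>
    intro i hany
    by_cases hc : min_start > e
    · simp [aScan, List.findIdx_cons, hc]
    · have hrest : rest.any (fun e => decide (min_start > e)) = true := by
        simpa [List.any_cons, hc] using hany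
      simp only [aScan, if_neg hc, ih (i + 1) hrest]
      simp [List.findIdx_cons, hc]
      omega

theorem main_loop :
    ∀ (genes : List (Int × Int × String × (List (Int × Int)))) (t : STree) (h cnt : Nat)
      (pistas : List Int) (acc : List (String × Int × (List (Int × Int)))),
      Wf h t →
      leavesOf t = pistas.map some ++ List.replicate (2 ^ h - cnt) none →
      cnt = pistas.length →
      cnt + genes.length ≤ 2 ^ h →
      aLoop genes pistas acc = bLoop genes t h cnt acc := by
  intro genes
  induction genes with
  | nil => intro t h cnt pistas acc _ _ _ _; rfl
  | cons g rest ih =>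
    obtain ⟨ms, me, name, regs⟩ := g
    intro t h cnt pistas acc hw hleaves hcnt hbound
    subst hcnt
    simp only [List.length_cons] at hbound
    have hanyEq : (leavesOf t).any (fun v => sLt v ms)
        = pistas.any (fun e => decide (ms > e)) := by
      simp [hleaves, List.any_append, List.any_map, List.any_replicate, sLt,
        Function.comp_def, gt_iff_lt]
    have hfun : ((fun v => sLt v ms) ∘ some) = (fun e : Int => decide (ms > e)) := by
      funext e; simp [sLt, Function.comp, gt_iff_lt]
    by_cases hany : pistas.any (fun e => decide (ms > e)) = true
    · -- an existing track fits: both pick the leftmost one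
      have hcond : sLt (sval t) ms = true := by
        rw [sval_any hw ms, hanyEq]; exact hany
      set j := pistas.findIdx (fun e => decide (ms > e)) with hj
      have hjlt : j < pistas.length :=
        List.findIdx_lt_length.mpr (by simpa using List.any_eq_true.mp hany)
      have hmapIdx : (List.map some pistas).findIdx (fun v => sLt v ms) = j := by
        rw [List.findIdx_map, hfun]
      have hfleaves : (leavesOf t).findIdx (fun v => sLt v ms) = j := by
        rw [hleaves, List.findIdx_append, hmapIdx, if_pos (by simpa using hjlt)]
      have hq : squery t h ms = j := by
        rw [squery_findIdx hw ms (by rw [hanyEq]; exact hany), hfleaves]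
      obtain ⟨hw', hl'⟩ := supdate_spec hw j me (by omega)
      simp only [aLoop, aScan_some ms me pistas 0 hany, bLoop, hcond, if_true, hq,
        ← hj, Nat.zero_add]
      refine ih _ _ _ _ _ hw' ?_ ?_ ?_
      · rw [hl', hleaves, List.set_append, if_pos (by simpa using hjlt), List.map_set]
      · simp
      · simpa using by omega
    · -- no track fits: both open track number pistas.length
      have hcond : sLt (sval t) ms = false := by
        rw [sval_any hw ms, hanyEq]; simpa using hany
      obtain ⟨hw', hl'⟩ := supdate_spec hw pistas.length me (by omega)
      simp only [aLoop, aScan_none ms me pistas 0 (by simpa using hany), bLoop, hcond,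
        Bool.false_eq_true, if_false]
      refine ih _ _ _ _ _ hw' ?_ ?_ ?_
      · rw [hl', hleaves, List.set_append, if_neg (by simp)]
        have hrest : 2 ^ h - pistas.length = (2 ^ h - (pistas.length + 1)) + 1 := by omega
        rw [hrest]
        simp [List.replicate_succ]
      · simp
      · simpa using by omega

theorem ceilH_ge_aux : ∀ (k n h : Nat), n - 2 ^ h ≤ k → n ≤ 2 ^ (ceilH n h) := by
  intro k
  induction k with
  | zero =>
    intro n h hk
    rw [ceilH, if_neg (by omega)]
    omega
  | succ k ih =>
    intro n h hk
    rw [ceilH]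
    by_cases hc : 2 ^ h < n
    · rw [if_pos hc]
      apply ih
      have : 2 ^ h < 2 ^ (h + 1) := Nat.pow_lt_pow_right (by norm_num) (Nat.lt_succ_self h)
      omega
    · rw [if_neg hc]; omega

theorem ceilH_ge (n h : Nat) : n ≤ 2 ^ (ceilH n h) :=
  ceilH_ge_aux (n - 2 ^ h) n h le_rfl

-- ===== VERDICT (by name: the statement is the Claim_ definition above) =====
theorem asignar_pistas_por_gen_py_spec : Claim_equal_asignar_pistas_por_gen_py := by
  intro genes _
  show asignar_pistas_por_gen_py genes = asignar_pistas_por_gen_py_alt genes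
  unfold asignar_pistas_por_gen_py asignar_pistas_por_gen_py_alt
  exact main_loop genes _ _ 0 [] [] (smake_wf _) (by simp [leaves_smake]) rfl
    (by simpa using ceilH_ge genes.length 0)
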